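-- pv_equiv track=rewrite | github.com/pwolle/memmpy | memmpy/_index.py | batch_slices
-- ===== SOURCE A (Python) =====
-- from typing import Generator, Literal
--
-- def batch_slices(
--     size: int,
--     batch_size: int,
--     drop_remainder: bool = False,
-- ) -> Generator[tuple[int, int], None, None]:
--     for start in range(0, size, batch_size):
--         stop = start + batch_size
--
--         if stop >= size:
--             if drop_remainder:
--                 break
--
--             stop = size
--
--         yield start, stop
-- ===== SOURCE B (Python) =====
-- def batch_slices(
--     size: int,
--     batch_size: int,
--     drop_remainder: bool = False,
-- ):
--     if batch_size <= 0:
--         raise ValueError("batch_size must be a positive integer")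
--     if drop_remainder:
--         n_batches = size // batch_size
--     else:
--         n_batches = -(-size // batch_size)  # ceiling division
--     for i in range(n_batches):
--         start = i * batch_size
--         yield start, min(start + batch_size, size)
-- ===== Notes on version B (the rewrite author's own statement) =====
-- stated objective: simpler
-- what changed: B computes the batch count in closed form (floor division with drop_remainder, ceiling division without) and emits each slice by index, instead of A's scan over range(0, size, batch_size) with an in-loop stop>=size test and break; Pre_ excludes batch_size <= 0, where A raises ValueError at 0 and returns accidental pairs for negative batch sizes while B raises ValueError.
-- intended difference: When drop_remainder is true and size is a positive exact multiple of batch_size, A's stop>=size break fires on a full batch so A drops the final full batch (e.g. returns [(0,3)] for (6,3,True)); B yields all size//batch_size full batches ([(0,3),(3,6)]), which is what drop_remainder is meant to do: drop only a partial remainder. — e.g. on batch_slices(6, 3, true): A returns [(0, 3)], B returns [(0, 3), (3, 6)]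
-- outside the precondition, e.g. on batch_slices(-5, -2, False): A returns [(0, -5), (-2, -5), (-4, -6)], B raises ValueError; on batch_slices(5, -2, False): A returns [], B raises ValueError
import Mathlib
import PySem

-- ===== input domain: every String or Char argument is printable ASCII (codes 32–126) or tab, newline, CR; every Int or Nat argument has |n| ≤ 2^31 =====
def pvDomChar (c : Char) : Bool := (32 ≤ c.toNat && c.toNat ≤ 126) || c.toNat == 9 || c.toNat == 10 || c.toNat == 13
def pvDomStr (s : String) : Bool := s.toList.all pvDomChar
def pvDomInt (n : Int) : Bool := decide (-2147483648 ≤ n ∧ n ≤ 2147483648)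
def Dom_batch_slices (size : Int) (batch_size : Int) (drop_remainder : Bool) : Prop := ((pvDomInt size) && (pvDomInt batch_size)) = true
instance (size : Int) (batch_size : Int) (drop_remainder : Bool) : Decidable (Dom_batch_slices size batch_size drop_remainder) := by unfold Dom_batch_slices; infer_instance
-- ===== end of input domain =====

-- B computes the batch count in closed form and emits slices by index instead of A's range-scan with break (different decomposition, no speed claim); on divisible sizes with drop_remainder A drops the final full batch and B intentionally keeps it (D_ below).

-- ===== PORT A =====
-- the body of A's for-loop over range(0, size, batch_size); `break` ends the recursion
def batchGoA (size batch_size : Int) (drop_remainder : Bool) : List Int → List (Int × Int)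
  | [] => []
  | start :: rest =>
    if start + batch_size ≥ size then
      if drop_remainder then []
      else (start, size) :: batchGoA size batch_size drop_remainder rest
    else (start, start + batch_size) :: batchGoA size batch_size drop_remainder rest

def batch_slices (size : Int) (batch_size : Int) (drop_remainder : Bool) : List (Int × Int) :=
  batchGoA size batch_size drop_remainder (PySem.List.pyRange 0 size batch_size)

-- ===== PORT B =====
def batch_slices_alt (size : Int) (batch_size : Int) (drop_remainder : Bool) : List (Int × Int) :=
  if batch_size ≤ 0 then []  -- Python B raises ValueError here; excluded by Pre_
  else
    let n_batches :=
      if drop_remainder then PySem.Int.floordiv size batch_size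
      else -(PySem.Int.floordiv (-size) batch_size)  -- ceiling division
    (PySem.List.pyRange 0 n_batches 1).map
      (fun i => (i * batch_size, min (i * batch_size + batch_size) size))

-- ===== PRECONDITION & SPEC =====
-- Pre_ restricts to the natural domain of a positive batch size: at batch_size = 0 A raises
-- ValueError (from range), and negative batch sizes are outside the function's purpose (A then
-- returns accidental pairs when size is also negative) while B raises ValueError there.
def Pre_batch_slices (size : Int) (batch_size : Int) (drop_remainder : Bool) : Prop :=
  1 ≤ batch_size
instance (size : Int) (batch_size : Int) (drop_remainder : Bool) : Decidable (Pre_batch_slices size batch_size drop_remainder) := by unfold Pre_batch_slices; infer_instance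

def pvWitness_batch_slices : Int × Int × Bool := (10, 3, false)

-- When drop_remainder is true and size is a positive exact multiple of batch_size, A's
-- stop>=size break fires on a full batch so A drops the final full batch; B yields all
-- size//batch_size full batches, which is what drop_remainder is meant to do: drop only a
-- partial remainder.
def D_batch_slices (size : Int) (batch_size : Int) (drop_remainder : Bool) : Prop :=
  drop_remainder = true ∧ 1 ≤ batch_size ∧ 0 < size ∧ size % batch_size = 0
instance (size : Int) (batch_size : Int) (drop_remainder : Bool) : Decidable (D_batch_slices size batch_size drop_remainder) := by unfold D_batch_slices; infer_instance

def Spec_batch_slices (size : Int) (batch_size : Int) (drop_remainder : Bool) (out : List (Int × Int)) : Prop := ¬ D_batch_slices size batch_size drop_remainder → out = batch_slices_alt size batch_size drop_remainder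
instance (size : Int) (batch_size : Int) (drop_remainder : Bool) (out : List (Int × Int)) : Decidable (Spec_batch_slices size batch_size drop_remainder out) := by unfold Spec_batch_slices; infer_instance

def pvDiffWitness_batch_slices : Int × Int × Bool := (6, 3, true)
def pvDiffWitnessOut_batch_slices : (List (Int × Int)) × (List (Int × Int)) := ([(0, 3)], [(0, 3), (3, 6)])

-- ===== CLAIM (what is proved, stated in full; the proofs are below) =====
def Claim_unchanged_batch_slices : Prop := ∀ (size : Int) (batch_size : Int) (drop_remainder : Bool), Dom_batch_slices size batch_size drop_remainder → Pre_batch_slices size batch_size drop_remainder → Spec_batch_slices size batch_size drop_remainder (batch_slices size batch_size drop_remainder)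
def Claim_changed_batch_slices : Prop := Dom_batch_slices (pvDiffWitness_batch_slices.1) (pvDiffWitness_batch_slices.2.1) (pvDiffWitness_batch_slices.2.2) ∧ Pre_batch_slices (pvDiffWitness_batch_slices.1) (pvDiffWitness_batch_slices.2.1) (pvDiffWitness_batch_slices.2.2) ∧ D_batch_slices (pvDiffWitness_batch_slices.1) (pvDiffWitness_batch_slices.2.1) (pvDiffWitness_batch_slices.2.2) ∧ batch_slices (pvDiffWitness_batch_slices.1) (pvDiffWitness_batch_slices.2.1) (pvDiffWitness_batch_slices.2.2) = pvDiffWitnessOut_batch_slices.1 ∧ batch_slices_alt (pvDiffWitness_batch_slices.1) (pvDiffWitness_batch_slices.2.1) (pvDiffWitness_batch_slices.2.2) = pvDiffWitnessOut_batch_slices.2 ∧ pvDiffWitnessOut_batch_slices.1 ≠ pvDiffWitnessOut_batch_slices.2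

-- ===== LEMMAS AND PROOFS =====

theorem pyRange_pos_nil {s : Int} (hs : 0 < s) {a b : Int} (h : b ≤ a) :
    PySem.List.pyRange a b s = [] := by
  rw [PySem.List.pyRange_of_pos a b hs]
  rw [if_neg (by omega : ¬ a < b)]
  simp

theorem pyRange_pos_cons {s : Int} (hs : 0 < s) {a b : Int} (h : a < b) :
    PySem.List.pyRange a b s = a :: PySem.List.pyRange (a + s) b s := by
  rw [PySem.List.pyRange_of_pos a b hs, PySem.List.pyRange_of_pos (a + s) b hs]
  have hcnt : ((b - a + s - 1) / s).toNat
      = (if a + s < b then ((b - (a + s) + s - 1) / s).toNat else 0) + 1 := by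
    by_cases h2 : a + s < b
    · rw [if_pos h2]
      have he : b - a + s - 1 = (b - (a + s) + s - 1) + 1 * s := by ring
      rw [he, Int.add_mul_ediv_right _ _ (by omega : s ≠ 0)]
      have hnn : 0 ≤ (b - (a + s) + s - 1) / s :=
        Int.ediv_nonneg (by omega) (by omega)
      omega
    · rw [if_neg h2]
      have h1 : 1 ≤ (b - a + s - 1) / s := by
        rw [Int.le_ediv_iff_mul_le hs]; omega
      have h2' : (b - a + s - 1) / s < 2 := by
        rw [Int.ediv_lt_iff_lt_mul hs]; omega
      omega
  rw [if_pos h, hcnt, List.range_succ_eq_map, List.map_cons, List.map_map]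
  congr 1
  · simp
  · apply List.map_congr_left
    intro k _
    simp only [Function.comp_apply]
    push_cast
    ring

theorem pyRange_shift {s : Int} (hs : 0 < s) (a b c : Int) :
    PySem.List.pyRange (a + c) b s = (PySem.List.pyRange a (b - c) s).map (· + c) := by
  rw [PySem.List.pyRange_of_pos _ _ hs, PySem.List.pyRange_of_pos _ _ hs, List.map_map]
  have hif : (if a + c < b then ((b - (a + c) + s - 1) / s).toNat else 0)
      = (if a < b - c then ((b - c - a + s - 1) / s).toNat else 0) := by
    split_ifs with h1 h2 h2
    · congr 2; ring
    · omega
    · omega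
    · rfl
  rw [hif]
  apply List.map_congr_left
  intro k _
  simp only [Function.comp_apply]
  ring

theorem batchGoA_shift (size bs : Int) (d : Bool) (c : Int) :
    ∀ l : List Int, batchGoA size bs d (l.map (· + c)) =
      (batchGoA (size - c) bs d l).map (fun p => (p.1 + c, p.2 + c))
  | [] => by simp [batchGoA]
  | x :: l => by
    simp only [List.map_cons, batchGoA]
    by_cases h : x + bs ≥ size - c
    · rw [if_pos (by omega : x + c + bs ≥ size), if_pos h]
      cases d
      · simp only [Bool.false_eq_true, if_false, List.map_cons]
        rw [batchGoA_shift size bs false c l]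
        simp
      · simp
    · rw [if_neg (by omega : ¬ x + c + bs ≥ size), if_neg h, List.map_cons,
        batchGoA_shift size bs d c l]
      congr 2
      ring

theorem floordiv_eq_of_bounds {a b q : Int} (hb : 0 < b) (h1 : q * b ≤ a)
    (h2 : a < (q + 1) * b) : PySem.Int.floordiv a b = q :=
  (PySem.Int.floordiv_eq_iff_of_pos hb).mpr ⟨h1, h2⟩

theorem divmod_spec {n bs : Int} (hbs : 1 ≤ bs) :
    PySem.Int.floordiv n bs * bs + PySem.Int.mod n bs = n ∧
      0 ≤ PySem.Int.mod n bs ∧ PySem.Int.mod n bs < bs := by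
  refine ⟨PySem.Int.floordiv_mul_add_mod n bs, ?_, ?_⟩
  · rw [PySem.Int.mod_eq_emod_of_pos (show (0:Int) < bs by omega)]
    exact Int.emod_nonneg n (by omega)
  · rw [PySem.Int.mod_eq_emod_of_pos (show (0:Int) < bs by omega)]
    exact Int.emod_lt_of_pos n (by omega)

-- A's step for bs < size: first batch is full, the rest is the shifted recursion
theorem A_step (size bs : Int) (hbs : 1 ≤ bs) (h : bs < size) (d : Bool) :
    batch_slices size bs d =
      (0, bs) :: (batch_slices (size - bs) bs d).map (fun p => (p.1 + bs, p.2 + bs)) := by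
  rw [batch_slices, pyRange_pos_cons (by omega : (0:Int) < bs) (by omega : (0:Int) < size)]
  simp only [batchGoA, zero_add, ge_iff_le]
  rw [if_neg (by omega : ¬ size ≤ bs)]
  have hsh := pyRange_shift (by omega : (0:Int) < bs) 0 size bs
  rw [zero_add] at hsh
  rw [hsh, batchGoA_shift size bs d bs (PySem.List.pyRange 0 (size - bs) bs)]
  rfl

-- B's batch count, for 1 ≤ bs
theorem nB_step (size bs : Int) (hbs : 1 ≤ bs) (h : bs < size) (d : Bool) :
    (if d then PySem.Int.floordiv (size - bs) bs else -(PySem.Int.floordiv (-(size - bs)) bs))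
      = (if d then PySem.Int.floordiv size bs else -(PySem.Int.floordiv (-size) bs)) - 1 := by
  obtain ⟨hqr, hr0, hrb⟩ := divmod_spec (n := size) hbs
  obtain ⟨hqr', hr0', hrb'⟩ := divmod_spec (n := -size) hbs
  cases d
  · simp only [Bool.false_eq_true, if_false]
    have : PySem.Int.floordiv (-(size - bs)) bs = PySem.Int.floordiv (-size) bs + 1 := by
      apply floordiv_eq_of_bounds (by omega) <;> nlinarith [hqr', hr0', hrb']
    omega
  · simp only [if_true]
    apply floordiv_eq_of_bounds (by omega) <;> nlinarith [hqr, hr0, hrb]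

theorem alt_step (size bs : Int) (hbs : 1 ≤ bs) (h : bs < size) (d : Bool) :
    batch_slices_alt size bs d =
      (0, bs) :: (batch_slices_alt (size - bs) bs d).map (fun p => (p.1 + bs, p.2 + bs)) := by
  unfold batch_slices_alt
  rw [if_neg (by omega : ¬ bs ≤ 0), if_neg (by omega : ¬ bs ≤ 0)]
  simp only []
  rw [nB_step size bs hbs h d]
  set n := (if d then PySem.Int.floordiv size bs else -(PySem.Int.floordiv (-size) bs)) with hn
  have hn1 : 1 ≤ n := by
    obtain ⟨hqr, hr0, hrb⟩ := divmod_spec (n := size) hbs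
    obtain ⟨hqr', hr0', hrb'⟩ := divmod_spec (n := -size) hbs
    rw [hn]; cases d
    · simp only [Bool.false_eq_true, if_false]; nlinarith
    · simp only [if_true]; nlinarith
  rw [pyRange_pos_cons (by norm_num : (0:Int) < 1) (by omega : (0:Int) < n)]
  rw [pyRange_shift (show (0:Int) < 1 by norm_num) 0 n 1]
  rw [List.map_cons, List.map_map, List.map_map]
  congr 1
  · simp only [zero_mul, zero_add]
    congr 1
    omega
  · apply List.map_congr_left
    intro k _
    simp only [Function.comp_apply, Prod.mk.injEq]
    constructor
    · ring
    · have : (k + 1) * bs + bs = k * bs + bs + bs := by ring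
      rw [this]
      omega

theorem alt_nonpos (size bs : Int) (hbs : 1 ≤ bs) (h : size ≤ 0) (d : Bool) :
    batch_slices_alt size bs d = [] := by
  unfold batch_slices_alt
  rw [if_neg (by omega : ¬ bs ≤ 0)]
  simp only []
  obtain ⟨hqr, hr0, hrb⟩ := divmod_spec (n := size) hbs
  obtain ⟨hqr', hr0', hrb'⟩ := divmod_spec (n := -size) hbs
  have hnle : (if d then PySem.Int.floordiv size bs else -(PySem.Int.floordiv (-size) bs)) ≤ 0 := by
    cases d
    · simp only [Bool.false_eq_true, if_false]; nlinarith
    · simp only [if_true]; nlinarith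
  rw [pyRange_pos_nil (by norm_num : (0:Int) < 1) hnle]
  rfl

theorem alt_small (size bs : Int) (hbs : 1 ≤ bs) (h0 : 0 < size) (h : size < bs) :
    batch_slices_alt size bs true = [] := by
  unfold batch_slices_alt
  rw [if_neg (by omega : ¬ bs ≤ 0)]
  simp only [if_true]
  have hq : PySem.Int.floordiv size bs = 0 :=
    floordiv_eq_of_bounds (by omega) (by omega) (by omega)
  rw [hq, pyRange_pos_nil (by norm_num : (0:Int) < 1) (le_refl (0:Int))]
  rfl

theorem alt_one (size bs : Int) (hbs : 1 ≤ bs) (h0 : 0 < size) (h : size ≤ bs) :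
    batch_slices_alt size bs false = [(0, size)] := by
  unfold batch_slices_alt
  rw [if_neg (by omega : ¬ bs ≤ 0)]
  simp only [Bool.false_eq_true, if_false]
  have hq : PySem.Int.floordiv (-size) bs = -1 :=
    floordiv_eq_of_bounds (by omega) (by omega) (by omega)
  rw [hq]
  have h1 : PySem.List.pyRange 0 (-(-1 : Int)) 1 = [0] := by decide
  rw [h1]
  simp only [List.map_cons, List.map_nil, zero_mul, zero_add]
  congr 2
  omega

theorem main_eq (bs : Int) (hbs : 1 ≤ bs) (d : Bool) :
    ∀ (m : Nat) (size : Int), size ≤ (m : Int) → ¬ D_batch_slices size bs d →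
      batch_slices size bs d = batch_slices_alt size bs d := by
  intro m
  induction m with
  | zero =>
    intro size hsz _
    have hle : size ≤ 0 := by exact_mod_cast hsz
    rw [batch_slices, pyRange_pos_nil (by omega : (0:Int) < bs) hle,
      alt_nonpos size bs hbs hle d]
    rfl
  | succ n ih =>
    intro size hsz hnd
    by_cases hle : size ≤ 0
    · rw [batch_slices, pyRange_pos_nil (by omega : (0:Int) < bs) hle,
        alt_nonpos size bs hbs hle d]
      rfl
    have hpos : 0 < size := by omega
    by_cases hsb : size ≤ bs
    · rw [batch_slices, pyRange_pos_cons (by omega : (0:Int) < bs) hpos,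
        pyRange_pos_nil (by omega : (0:Int) < bs) (by omega : size ≤ 0 + bs)]
      simp only [batchGoA, zero_add, ge_iff_le]
      rw [if_pos hsb]
      cases d
      · rw [alt_one size bs hbs hpos hsb]
        norm_num
      · have hlt : size < bs := by
          rcases lt_or_eq_of_le hsb with h | h
          · exact h
          · exfalso
            apply hnd
            exact ⟨rfl, hbs, hpos, by rw [h]; exact Int.emod_self⟩
        rw [alt_small size bs hbs hpos hlt]
        norm_num
    · have hbs' : bs < size := by omega
      rw [A_step size bs hbs hbs' d, alt_step size bs hbs hbs' d]
      congr 2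
      apply ih (size - bs) (by omega)
      intro ⟨hd, _, hp, hm⟩
      apply hnd
      exact ⟨hd, hbs, by omega, by rw [← Int.sub_emod_right size bs]; exact hm⟩

-- ===== VERDICT (by name: the statement is the Claim_ definition above) =====
theorem batch_slices_spec : Claim_unchanged_batch_slices := by
  intro size batch_size drop_remainder _hdom hpre
  unfold Spec_batch_slices
  intro hnd
  exact main_eq batch_size hpre drop_remainder size.toNat size (by omega) hnd

theorem batch_slices_changed : Claim_changed_batch_slices := by
  unfold Claim_changed_batch_slices; decide
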